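-- pv_equiv track=rewrite | github.com/am1bestofluck/py_start_3 | homework_sem3.py | winged_fib
-- ===== SOURCE A (Python) =====
-- from typing import Dict, List
--
-- def fib(seed: int) -> int:
--     """считаем число ряда Фибоначи seed- порядка.  """
--     a, b = 0, 1
--     seed_modified = 0
--     while seed > seed_modified:
--         seed_modified += 1
--         a, b = b, a+b  # такое решение прямо на сайте python :( :D
--     return a
--
-- def winged_fib(limit: int) -> Dict[int, int]:
--     """Выводим числа Фибоначи с ключами от -limit до limit включительно
--
--     limit - край последовательности
--     """
--     """Для этого Мы сначала проходимся по положительному крылу,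
--     потом отзеркаливаем негативное крыло, переворачивая значение для
--     нечётных индексов
--
--     tmp - несортированный вывод
--     keys_sorted - упорядочиваем ключи.
--     output - ответ в зачёт
--     """
--     tmp, output = {}, {}
--     for iteration_key in range(0, abs(limit) + 1, 1):
--         tmp[iteration_key] = fib(seed=iteration_key)
--     for key in range(-1, - (abs(limit) + 1), -1):
--         tmp[key] = tmp[-key] if key % 2 else - tmp[-key]
--     keys_sorted = sorted(list(tmp.keys()))
--     for out in keys_sorted:
--         output[out] = tmp[out]
--     return output
-- ===== SOURCE B (Python) =====
-- def winged_fib(limit: int):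
--     """Same mapping as A, computed in one linear pass: build the Fibonacci
--     prefix [F0..Fn] incrementally, then emit the already-sorted pair list
--     (mirrored negative wing, then the positive wing) and make the dict once."""
--     n = abs(limit)
--     fibs = []
--     a, b = 0, 1
--     for _ in range(n + 1):
--         fibs.append(a)
--         a, b = b, a + b
--     pairs = [(k, fibs[-k] if k % 2 else -fibs[-k]) for k in range(-n, 0)]
--     pairs += [(k, fibs[k]) for k in range(0, n + 1)]
--     return dict(pairs)
-- ===== Notes on version B (the rewrite author's own statement) =====
-- stated objective: faster
-- what changed: A recomputes each Fibonacci number from scratch per key and sorts the keys of an unordered dict; B builds the Fibonacci prefix once in a single incremental pass and emits the pair list directly in sorted order (negative wing reversed, then positive wing), no sort and no quadratic recomputation.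
import Mathlib
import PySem

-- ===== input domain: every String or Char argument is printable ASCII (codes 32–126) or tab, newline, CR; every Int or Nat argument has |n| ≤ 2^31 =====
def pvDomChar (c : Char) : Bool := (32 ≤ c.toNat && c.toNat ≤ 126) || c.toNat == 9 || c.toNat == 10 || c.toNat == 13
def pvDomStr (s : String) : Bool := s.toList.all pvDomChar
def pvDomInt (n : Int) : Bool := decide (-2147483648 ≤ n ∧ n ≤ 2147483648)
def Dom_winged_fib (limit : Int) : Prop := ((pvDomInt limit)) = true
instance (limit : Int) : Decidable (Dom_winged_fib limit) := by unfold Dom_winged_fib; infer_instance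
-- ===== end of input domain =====

-- B replaces A's per-key from-scratch Fibonacci recomputation plus key sort by one
-- incremental Fibonacci pass emitting the pair list already in sorted key order.

-- ===== PORT A =====
-- A's `fib`: the while loop runs exactly max(seed, 0) = seed.toNat iterations over state (a, b)
def fibLoop : Nat → Int → Int → Int
  | 0, a, _ => a
  | k+1, a, b => fibLoop k b (a + b)

def fib (seed : Int) : Int := fibLoop seed.toNat 0 1

def winged_fib (limit : Int) : List (Int × Int) :=
  -- tmp after the first loop (abs(limit) = (limit.natAbs : Int))
  let tmp1 := (PySem.List.pyRange 0 ((limit.natAbs : Int) + 1) 1).foldl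
      (fun d k => d.insert k (fib k)) (PySem.Dict.empty : PySem.Dict Int Int)
  -- Python's tmp[-key] (the key -key is always present, filled by the first loop) → getD 0
  let tmp2 := (PySem.List.pyRange (-1) (-((limit.natAbs : Int) + 1)) (-1)).foldl
      (fun d k => d.insert k (if PySem.Int.mod k 2 ≠ 0 then d.getD (-k) 0 else -(d.getD (-k) 0))) tmp1
  let keysSorted := PySem.List.sorted tmp2.keys (fun x => x) false
  (keysSorted.foldl (fun d k => d.insert k (tmp2.getD k 0)) (PySem.Dict.empty : PySem.Dict Int Int)).items

-- ===== PORT B =====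
-- B's fibs list: `for _ in range(m): fibs.append(a); a, b = b, a + b`
def fibPrefix : Nat → Int → Int → List Int
  | 0, _, _ => []
  | m+1, a, b => a :: fibPrefix m b (a + b)

def winged_fib_alt (limit : Int) : List (Int × Int) :=
  let n : Int := (limit.natAbs : Int)
  let fibs := fibPrefix (limit.natAbs + 1) 0 1
  -- fibs[-k] / fibs[k]: indices are always in range here, so pyGetD _ _ 0 is exact
  let pairs := (PySem.List.pyRange (-n) 0 1).map
      (fun k => (k, if PySem.Int.mod k 2 ≠ 0 then PySem.List.pyGetD fibs (-k) 0
                    else -(PySem.List.pyGetD fibs (-k) 0)))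
    ++ (PySem.List.pyRange 0 (n + 1) 1).map (fun k => (k, PySem.List.pyGetD fibs k 0))
  (PySem.Dict.ofList pairs).items

-- ===== PRECONDITION & SPEC =====
def Spec_winged_fib (limit : Int) (out : List (Int × Int)) : Prop := out = winged_fib_alt limit
instance (limit : Int) (out : List (Int × Int)) : Decidable (Spec_winged_fib limit out) := by unfold Spec_winged_fib; infer_instance

-- ===== CLAIM (what is proved, stated in full; the proofs are below) =====
def Claim_equal_winged_fib : Prop := ∀ (limit : Int), Dom_winged_fib limit → Spec_winged_fib limit (winged_fib limit)

-- ===== LEMMAS AND PROOFS =====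

-- the value A's second loop stores at a negative key k
def gneg (k : Int) : Int := if PySem.Int.mod k 2 ≠ 0 then fib (-k) else -(fib (-k))

theorem tmp1_items (n : Nat) :
    ((PySem.List.pyRange 0 ((n:Int)+1) 1).foldl (fun d k => d.insert k (fib k))
      (PySem.Dict.empty : PySem.Dict Int Int)).items
    = (PySem.List.pyRange 0 ((n:Int)+1) 1).map (fun k => (k, fib k)) := by
  rw [PySem.Dict.items_foldl_insert_fresh (k := fun x => x) (v := fib)]
  · simp [PySem.Dict.empty]
  · intro a _; simp [PySem.Dict.contains_empty]
  · simpa using PySem.List.nodup_pyRange_one 0 ((n:Int)+1)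

theorem negLoop (l : List Int) (d : PySem.Dict Int Int)
    (hneg : ∀ k ∈ l, k < 0) (hnd : l.Nodup)
    (hfresh : ∀ k ∈ l, d.contains k = false)
    (hval : ∀ k ∈ l, d.getD (-k) 0 = fib (-k)) :
    (l.foldl (fun d k => d.insert k (if PySem.Int.mod k 2 ≠ 0 then d.getD (-k) 0 else -(d.getD (-k) 0))) d).items
    = d.items ++ l.map (fun k => (k, gneg k)) := by
  induction l generalizing d with
  | nil => simp
  | cons k t ih =>
    have hk : k < 0 := hneg k (List.mem_cons_self ..)
    have hvk : d.getD (-k) 0 = fib (-k) := hval k (List.mem_cons_self ..)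
    simp only [List.foldl_cons]
    rw [ih]
    · rw [PySem.Dict.items_insert_of_not_contains _ _ (hfresh k (List.mem_cons_self ..))]
      simp [hvk, gneg, List.append_assoc]
    · exact fun x hx => hneg x (List.mem_cons_of_mem _ hx)
    · exact hnd.of_cons
    · intro x hx
      rw [PySem.Dict.contains_insert]
      have : x ≠ k := fun h => (List.nodup_cons.mp hnd).1 (h ▸ hx)
      simp [this, hfresh x (List.mem_cons_of_mem _ hx)]
    · intro x hx
      rw [PySem.Dict.getD_insert]
      have hx0 : x < 0 := hneg x (List.mem_cons_of_mem _ hx)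
      rw [if_neg (by omega)]
      exact hval x (List.mem_cons_of_mem _ hx)

theorem tmp2_items (n : Nat) :
    ((PySem.List.pyRange (-1) (-((n:Int)+1)) (-1)).foldl
        (fun d k => d.insert k (if PySem.Int.mod k 2 ≠ 0 then d.getD (-k) 0 else -(d.getD (-k) 0)))
        ((PySem.List.pyRange 0 ((n:Int)+1) 1).foldl (fun d k => d.insert k (fib k))
          (PySem.Dict.empty : PySem.Dict Int Int))).items
    = (PySem.List.pyRange 0 ((n:Int)+1) 1).map (fun k => (k, fib k))
      ++ (PySem.List.pyRange (-1) (-((n:Int)+1)) (-1)).map (fun k => (k, gneg k)) := by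
  have hkeys1 : ((PySem.List.pyRange 0 ((n:Int)+1) 1).foldl (fun d k => d.insert k (fib k))
      (PySem.Dict.empty : PySem.Dict Int Int)).keys = PySem.List.pyRange 0 ((n:Int)+1) 1 := by
    simp only [PySem.Dict.keys, tmp1_items, List.map_map]
    exact List.map_congr_left (fun _ _ => rfl) |>.trans (List.map_id _)
  rw [negLoop, tmp1_items]
  · intro k hk
    rw [PySem.List.mem_pyRange_neg_one] at hk
    omega
  · rw [PySem.List.pyRange_neg_one_eq_reverse]
    exact List.nodup_reverse.mpr (PySem.List.nodup_pyRange_one _ _)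
  · intro k hk
    rw [PySem.List.mem_pyRange_neg_one] at hk
    rw [PySem.Dict.contains_eq_decide_mem_keys, hkeys1]
    simp only [decide_eq_false_iff_not, PySem.List.mem_pyRange_one]
    omega
  · intro k hk
    rw [PySem.List.mem_pyRange_neg_one] at hk
    apply PySem.Dict.getD_of_mem_items
    · rw [tmp1_items]
      exact List.mem_map_of_mem (by rw [PySem.List.mem_pyRange_one]; omega)
    · rw [hkeys1]; exact PySem.List.nodup_pyRange_one _ _

-- the value sitting in tmp at key k at the end of A's second loop
theorem tmp2_getD (n : Nat) (k : Int) (hk : -(n:Int) ≤ k ∧ k < (n:Int)+1) :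
    ((PySem.List.pyRange (-1) (-((n:Int)+1)) (-1)).foldl
        (fun d k => d.insert k (if PySem.Int.mod k 2 ≠ 0 then d.getD (-k) 0 else -(d.getD (-k) 0)))
        ((PySem.List.pyRange 0 ((n:Int)+1) 1).foldl (fun d k => d.insert k (fib k))
          (PySem.Dict.empty : PySem.Dict Int Int))).getD k 0
    = if k < 0 then gneg k else fib k := by
  have hnd := PySem.Dict.nodup_keys_foldl_insert
    (PySem.List.pyRange (-1) (-((n:Int)+1)) (-1))
    (fun d k => if PySem.Int.mod k 2 ≠ 0 then d.getD (-k) 0 else -(d.getD (-k) 0))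
    ((PySem.List.pyRange 0 ((n:Int)+1) 1).foldl (fun d k => d.insert k (fib k))
          (PySem.Dict.empty : PySem.Dict Int Int))
    (PySem.Dict.nodup_keys_foldl_insert _ (fun _ k => fib k) _ PySem.Dict.nodup_keys_empty)
  by_cases hk0 : k < 0
  · rw [if_pos hk0]
    refine PySem.Dict.getD_of_mem_items _ ?_ hnd 0
    rw [tmp2_items]
    refine List.mem_append_right _ (List.mem_map_of_mem ?_)
    rw [PySem.List.mem_pyRange_neg_one]
    omega
  · rw [if_neg hk0]
    refine PySem.Dict.getD_of_mem_items _ ?_ hnd 0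
    rw [tmp2_items]
    refine List.mem_append_left _ (List.mem_map_of_mem ?_)
    rw [PySem.List.mem_pyRange_one]
    omega

theorem keys_sorted_eq (n : Nat) :
    PySem.List.sorted
      (((PySem.List.pyRange 0 ((n:Int)+1) 1).map (fun k => (k, fib k))
        ++ (PySem.List.pyRange (-1) (-((n:Int)+1)) (-1)).map (fun k => (k, gneg k))).map Prod.fst)
      (fun x => x) false
    = PySem.List.pyRange (-(n:Int)) ((n:Int)+1) 1 := by
  apply PySem.List.sorted_eq_of_perm_of_pairwise_lt
  · have h1 : ((PySem.List.pyRange 0 ((n:Int)+1) 1).map (fun k => (k, fib k))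
        ++ (PySem.List.pyRange (-1) (-((n:Int)+1) ) (-1)).map (fun k => (k, gneg k))).map Prod.fst
        = PySem.List.pyRange 0 ((n:Int)+1) 1 ++ (PySem.List.pyRange (-(n:Int)) 0 1).reverse := by
      rw [List.map_append, List.map_map, List.map_map]
      congr 1
      · exact List.map_congr_left (fun _ _ => rfl) |>.trans (List.map_id _)
      · refine ((List.map_congr_left (fun _ _ => rfl)).trans (List.map_id _)).trans ?_
        rw [PySem.List.pyRange_neg_one_eq_reverse]
        norm_num
    rw [h1, PySem.List.pyRange_one_append (-(n:Int)) 0 ((n:Int)+1) (by omega) (by omega)]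
    exact List.perm_append_comm.trans (List.Perm.append_left _ (List.reverse_perm _).symm)
  · exact PySem.List.pairwise_lt_pyRange_one _ _

theorem length_fibPrefix (m : Nat) (a b : Int) : (fibPrefix m a b).length = m := by
  induction m generalizing a b with
  | zero => rfl
  | succ m ih => simp [fibPrefix, ih]

theorem getElem_fibPrefix (m i : Nat) (a b : Int) (h : i < m) :
    (fibPrefix m a b)[i]'(by rw [length_fibPrefix]; exact h) = fibLoop i a b := by
  induction m generalizing i a b with
  | zero => omega
  | succ m ih =>
    cases i with
    | zero => rfl
    | succ i => simpa [fibPrefix, fibLoop] using ih i b (a + b) (by omega)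


theorem pyGetD_fibPrefix (n : Nat) (j : Int) (h0 : 0 ≤ j) (h1 : j ≤ (n:Int)) :
    PySem.List.pyGetD (fibPrefix (n+1) 0 1) j 0 = fib j := by
  have hj : j = ((j.toNat : Nat) : Int) := by omega
  have hlt : j.toNat < n + 1 := by omega
  rw [hj, PySem.List.pyGetD_natCast]
  rw [List.getD_eq_getElem _ _ (by rw [length_fibPrefix]; exact hlt)]
  rw [getElem_fibPrefix _ _ _ _ hlt]
  simp only [fib]
  congr 1

theorem items_ofList_pairs (l : List (Int × Int)) (h : (l.map Prod.fst).Nodup) :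
    (PySem.Dict.ofList l).items = l := by
  unfold PySem.Dict.ofList PySem.Dict.update
  rw [PySem.Dict.items_foldl_insert_fresh (k := Prod.fst) (v := Prod.snd)]
  · simp [PySem.Dict.empty]
  · intro a _; simp [PySem.Dict.contains_empty]
  · exact h

theorem winged_fib_eq (limit : Int) :
    winged_fib limit
    = (PySem.List.pyRange (-(limit.natAbs:Int)) 0 1).map (fun k => (k, gneg k))
      ++ (PySem.List.pyRange 0 ((limit.natAbs:Int)+1) 1).map (fun k => (k, fib k)) := by
  generalize hN : limit.natAbs = n
  unfold winged_fib
  simp only [hN, PySem.Dict.keys]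
  rw [tmp2_items, keys_sorted_eq]
  rw [PySem.Dict.items_foldl_insert_fresh (k := fun x => x) (v := fun k =>
    ((PySem.List.pyRange (-1) (-((n:Int)+1)) (-1)).foldl
        (fun d k => d.insert k (if PySem.Int.mod k 2 ≠ 0 then d.getD (-k) 0 else -(d.getD (-k) 0)))
        ((PySem.List.pyRange 0 ((n:Int)+1) 1).foldl (fun d k => d.insert k (fib k))
          (PySem.Dict.empty : PySem.Dict Int Int))).getD k 0)]
  · rw [PySem.List.pyRange_one_append (-(n:Int)) 0 ((n:Int)+1) (by omega) (by omega),
      List.map_append]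
    rw [show (PySem.Dict.empty : PySem.Dict Int Int).items = [] from rfl, List.nil_append]
    congr 1
    · apply List.map_congr_left
      intro k hk
      rw [PySem.List.mem_pyRange_one] at hk
      rw [tmp2_getD n k (by omega)]
      rw [if_pos (by omega)]
    · apply List.map_congr_left
      intro k hk
      rw [PySem.List.mem_pyRange_one] at hk
      rw [tmp2_getD n k (by omega)]
      rw [if_neg (by omega)]
  · intro a _; simp [PySem.Dict.contains_empty]
  · simpa using PySem.List.nodup_pyRange_one (-(n:Int)) ((n:Int)+1)

theorem winged_fib_alt_eq (limit : Int) :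
    winged_fib_alt limit
    = (PySem.List.pyRange (-(limit.natAbs:Int)) 0 1).map (fun k => (k, gneg k))
      ++ (PySem.List.pyRange 0 ((limit.natAbs:Int)+1) 1).map (fun k => (k, fib k)) := by
  generalize hN : limit.natAbs = n
  unfold winged_fib_alt
  simp only [hN]
  rw [items_ofList_pairs]
  · congr 1
    · apply List.map_congr_left
      intro k hk
      rw [PySem.List.mem_pyRange_one] at hk
      rw [pyGetD_fibPrefix n (-k) (by omega) (by omega)]
      rfl
    · apply List.map_congr_left
      intro k hk
      rw [PySem.List.mem_pyRange_one] at hk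
      rw [pyGetD_fibPrefix n k (by omega) (by omega)]
  · rw [List.map_append, List.map_map, List.map_map]
    rw [List.nodup_append]
    refine ⟨?_, ?_, ?_⟩
    · exact (List.map_congr_left (fun _ _ => rfl) |>.trans (List.map_id _)) ▸
        PySem.List.nodup_pyRange_one (-(n:Int)) 0
    · exact (List.map_congr_left (fun _ _ => rfl) |>.trans (List.map_id _)) ▸
        PySem.List.nodup_pyRange_one 0 ((n:Int)+1)
    · intro x hx y hy
      simp only [List.mem_map] at hx hy
      obtain ⟨a, ha, rfl⟩ := hx
      obtain ⟨b, hb, rfl⟩ := hy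
      rw [PySem.List.mem_pyRange_one] at ha hb
      simp only [Function.comp_apply]
      omega

-- ===== VERDICT (by name: the statement is the Claim_ definition above) =====
theorem winged_fib_spec : Claim_equal_winged_fib := by
  intro limit _
  unfold Spec_winged_fib
  rw [winged_fib_eq, winged_fib_alt_eq]
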